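-- pv_equiv track=rewrite | github.com/Svehini/knowit-kodekalender-2025 | dag_7/dag7.py | isThereNisse
-- ===== SOURCE A (Python) =====
-- def isThereNisse(word, nisse, distance):
--     for i in range(0, len(word)):
--         if word[i] == nisse[0] and distance <= 2:
--             if len(nisse) == 1:
--                 return 1
--             new_nisse = nisse[1:]
--             if isThereNisse(word[i+1:], new_nisse, 0):
--                 return 1
--         distance+=1
--     return 0
-- ===== SOURCE B (Python) =====
-- def isThereNisse(word, nisse, distance):
--     if not nisse:
--         return 0
--     n = len(word)
--     # positions where nisse[0] can match: index < 3 - distance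
--     cur = {i for i in range(min(n, max(0, 3 - distance))) if word[i] == nisse[0]}
--     for ch in nisse[1:]:
--         if not cur:
--             return 0
--         cur = {i for e in cur for i in range(e + 1, min(n, e + 4)) if word[i] == ch}
--     return 1 if cur else 0
-- ===== Notes on version B (the rewrite author's own statement) =====
-- stated objective: faster
-- what changed: Replaced A's recursive backtracking over candidate match positions with a single forward sweep over nisse that maintains the set of word positions where the current prefix can end (window of 3), with an early exit when the set empties.
import Mathlib
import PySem

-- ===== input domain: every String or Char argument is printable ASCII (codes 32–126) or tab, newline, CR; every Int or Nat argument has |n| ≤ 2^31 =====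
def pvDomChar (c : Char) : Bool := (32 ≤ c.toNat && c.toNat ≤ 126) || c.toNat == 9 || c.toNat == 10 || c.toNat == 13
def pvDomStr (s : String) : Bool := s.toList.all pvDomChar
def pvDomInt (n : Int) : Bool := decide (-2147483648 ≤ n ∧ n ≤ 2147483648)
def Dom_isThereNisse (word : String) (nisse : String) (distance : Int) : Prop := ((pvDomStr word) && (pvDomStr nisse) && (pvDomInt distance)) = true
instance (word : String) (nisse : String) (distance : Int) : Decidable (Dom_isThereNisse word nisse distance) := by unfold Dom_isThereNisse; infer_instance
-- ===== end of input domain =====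

-- B replaces A's recursive backtracking with a forward sweep over nisse keeping the set
-- of word positions where the current prefix of nisse can end (objective: faster).

-- ===== PORT A =====
-- A's for-loop over i (with the mutable `distance` incremented each step, and the
-- recursive call on word[i+1:], nisse[1:], 0) written as structural recursion on
-- the character list: the list head is word[i], the tail is word[i+1:].
def pvA : List Char → List Char → Int → Int
  | [], _, _ => 0
  | c :: rest, nisse, d =>
    match nisse with
    | [] => 0  -- Python raises IndexError on nisse[0] here; excluded by Pre_
    | n0 :: nt =>
      if c = n0 ∧ d ≤ 2 then
        if nt = [] then 1
        else if pvA rest nt 0 ≠ 0 then 1 else pvA rest (n0 :: nt) (d + 1)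
      else pvA rest (n0 :: nt) (d + 1)

def isThereNisse (word : String) (nisse : String) (distance : Int) : Int :=
  pvA word.toList nisse.toList distance

-- ===== PORT B =====
-- {i for i in range(min(n, max(0, 3 - distance))) if word[i] == nisse[0]}
def pvCur0 (w : List Char) (n0 : Char) (d : Int) : PySem.Set Int :=
  PySem.Set.ofList ((PySem.List.pyRange 0 (min (w.length : Int) (max 0 (3 - d))) 1).filter
    (fun i => decide (PySem.List.pyGet? w i = some n0)))

-- {i for e in cur for i in range(e + 1, min(n, e + 4)) if word[i] == ch}
def pvStep (w : List Char) (ch : Char) (cur : PySem.Set Int) : PySem.Set Int :=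
  PySem.Set.ofList (cur.flatMap (fun e => (PySem.List.pyRange (e + 1) (min (w.length : Int) (e + 4)) 1).filter
    (fun i => decide (PySem.List.pyGet? w i = some ch))))

-- the 'for ch in nisse[1:]' loop with its early 'return 0', then 'return 1 if cur else 0'
def pvLoop (w : List Char) : List Char → PySem.Set Int → Int
  | [], cur => if cur = [] then 0 else 1
  | ch :: rest, cur => if cur = [] then 0 else pvLoop w rest (pvStep w ch cur)

def isThereNisse_alt (word : String) (nisse : String) (distance : Int) : Int :=
  match nisse.toList with
  | [] => 0
  | n0 :: nt => pvLoop word.toList nt (pvCur0 word.toList n0 distance)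

-- ===== PRECONDITION & SPEC =====
-- Pre_ excludes exactly the inputs where A raises IndexError (nisse empty while word is non-empty).
def Pre_isThereNisse (word : String) (nisse : String) (distance : Int) : Prop :=
  nisse = "" → word = ""
instance (word : String) (nisse : String) (distance : Int) : Decidable (Pre_isThereNisse word nisse distance) := by unfold Pre_isThereNisse; infer_instance

def pvWitness_isThereNisse : String × String × Int := ("nisse", "ns", 0)

def Spec_isThereNisse (word : String) (nisse : String) (distance : Int) (out : Int) : Prop := out = isThereNisse_alt word nisse distance
instance (word : String) (nisse : String) (distance : Int) (out : Int) : Decidable (Spec_isThereNisse word nisse distance out) := by unfold Spec_isThereNisse; infer_instance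

-- ===== CLAIM (what is proved, stated in full; the proofs are below) =====
def Claim_equal_isThereNisse : Prop := ∀ (word : String) (nisse : String) (distance : Int), Dom_isThereNisse word nisse distance → Pre_isThereNisse word nisse distance → Spec_isThereNisse word nisse distance (isThereNisse word nisse distance)

-- ===== LEMMAS AND PROOFS =====

-- proof-only middle-man: "nisse (= n0 :: nt) matches in w with its first character at an index ≤ b,
-- every later character within 3 positions of the previous one" — same search as A, without d-bookkeeping
def pvCan : List Char → Char → List Char → Int → Bool
  | [], _, _, _ => false
  | c :: rest, n0, nt, b =>
    ((decide (0 ≤ b) && decide (c = n0)) &&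
      (match nt with | [] => true | m0 :: mt => pvCan rest m0 mt 2)) || pvCan rest n0 nt (b - 1)

-- "the rest of nisse can still be matched after a hit at index e of w"
def pvTail (w : List Char) (e : Int) : List Char → Bool
  | [] => true
  | m0 :: mt => pvCan (w.drop (e + 1).toNat) m0 mt 2

theorem pvTail_cons_shift (c : Char) (rest : List Char) (j : Int) (hj : 0 ≤ j) (nt : List Char) :
    pvTail (c :: rest) (j + 1) nt = pvTail rest j nt := by
  cases nt with
  | nil => rfl
  | cons m0 mt =>
    simp only [pvTail]
    have h : (j + 1 + 1).toNat = (j + 1).toNat + 1 := by omega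
    rw [h, List.drop_succ_cons]

theorem pvCan_cons (c : Char) (rest : List Char) (n0 : Char) (nt : List Char) (b : Int) :
    pvCan (c :: rest) n0 nt b =
      (((decide (0 ≤ b) && decide (c = n0)) && pvTail (c :: rest) 0 nt) || pvCan rest n0 nt (b - 1)) := by
  cases nt with
  | nil => rfl
  | cons m0 mt =>
    simp only [pvCan, pvTail]
    norm_num

theorem pvA_eq_can (w : List Char) (n0 : Char) (nt : List Char) (d : Int) :
    pvA w (n0 :: nt) d = if pvCan w n0 nt (2 - d) then 1 else 0 := by
  induction w generalizing n0 nt d with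
  | nil => simp [pvA, pvCan]
  | cons c rest ih =>
    have h2' : ((0:Int) ≤ 2 - d) ↔ d ≤ 2 := by omega
    cases nt with
    | nil =>
      have ihA := ih n0 [] (d + 1)
      have e1 : 2 - (d + 1) = 2 - d - 1 := by ring
      rw [e1] at ihA
      simp only [pvA, pvCan, ihA]
      by_cases h1 : c = n0 <;> by_cases h2 : d ≤ 2 <;>
        by_cases h3 : pvCan rest n0 [] (2 - d - 1) <;>
          simp [h1, h2', h3]
    | cons m0 mt =>
      have ihB := ih m0 mt 0
      norm_num at ihB
      have ihA := ih n0 (m0 :: mt) (d + 1)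
      have e1 : 2 - (d + 1) = 2 - d - 1 := by ring
      rw [e1] at ihA
      simp only [pvA, pvCan, ihA, ihB]
      by_cases h1 : c = n0 <;> by_cases h2 : d ≤ 2 <;>
        by_cases h3 : pvCan rest m0 mt 2 <;>
          by_cases h4 : pvCan rest n0 (m0 :: mt) (2 - d - 1) <;>
            simp [h1, h2', h3, h4]

theorem pvCan_iff (u : List Char) (n0 : Char) (nt : List Char) (b : Int) :
    pvCan u n0 nt b = true ↔
      ∃ j : Nat, (j : Int) ≤ b ∧ u[j]? = some n0 ∧ pvTail u (j : Int) nt = true := by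
  induction u generalizing b with
  | nil => simp [pvCan]
  | cons c rest ih =>
    rw [pvCan_cons]
    simp only [Bool.or_eq_true, Bool.and_eq_true, decide_eq_true_eq]
    constructor
    · rintro (⟨⟨hb, hc⟩, ht⟩ | h)
      · exact ⟨0, by exact_mod_cast hb, by simp [hc], by simpa using ht⟩
      · obtain ⟨j, hj, hg, ht⟩ := (ih (b - 1)).mp h
        refine ⟨j + 1, by push_cast; omega, by simpa using hg, ?_⟩
        have : ((j : Int) + 1) = (((j + 1 : Nat) : Int)) := by push_cast; ring
        rw [← this] at *
        rw [show (((j:Nat):Int) + 1) = ((j:Int) + 1) from rfl] at *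
        rw [pvTail_cons_shift c rest (j : Int) (by positivity) nt]
        exact ht
    · rintro ⟨j, hj, hg, ht⟩
      cases j with
      | zero =>
        left
        refine ⟨⟨by exact_mod_cast hj, by simpa using hg⟩, by simpa using ht⟩
      | succ j =>
        right
        refine (ih (b - 1)).mpr ⟨j, by push_cast at hj ⊢; omega, by simpa using hg, ?_⟩
        have hs : (((j + 1 : Nat) : Int)) = (j : Int) + 1 := by push_cast; ring
        rw [hs, pvTail_cons_shift c rest (j : Int) (by positivity) nt] at ht
        exact ht

theorem pyGet?_nonneg_eq (w : List Char) (i : Int) (h : 0 ≤ i) :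
    PySem.List.pyGet? w i = w[i.toNat]? := PySem.List.pyGet?_of_nonneg w h

theorem int_lt_of_pyGet?_some (w : List Char) (i : Int) (x : Char)
    (h : PySem.List.pyGet? w i = some x) : i < (w.length : Int) := by
  by_contra hlt
  have : PySem.List.pyGet? w i = none := by
    rw [PySem.List.pyGet?_eq_none_iff]
    intro hin
    rcases hin with ⟨_, h2⟩
    omega
  rw [this] at h
  simp at h

theorem mem_pvCur0 (w : List Char) (n0 : Char) (d : Int) (i : Int) :
    i ∈ pvCur0 w n0 d ↔ 0 ≤ i ∧ i ≤ 2 - d ∧ PySem.List.pyGet? w i = some n0 := by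
  unfold pvCur0
  rw [PySem.Set.mem_ofList]
  simp only [List.mem_filter, PySem.List.mem_pyRange_one, decide_eq_true_eq]
  constructor
  · rintro ⟨⟨h0, hlt⟩, hg⟩
    exact ⟨h0, by omega, hg⟩
  · rintro ⟨h0, hle, hg⟩
    have := int_lt_of_pyGet?_some w i n0 hg
    exact ⟨⟨h0, by omega⟩, hg⟩

theorem mem_pvStep (w : List Char) (ch : Char) (cur : PySem.Set Int) (i : Int) :
    i ∈ pvStep w ch cur ↔
      ∃ e ∈ cur, e + 1 ≤ i ∧ i < min (w.length : Int) (e + 4) ∧ PySem.List.pyGet? w i = some ch := by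
  unfold pvStep
  rw [PySem.Set.mem_ofList]
  simp only [List.mem_flatMap, List.mem_filter, PySem.List.mem_pyRange_one, decide_eq_true_eq]
  constructor
  · rintro ⟨e, he, ⟨h1, h2⟩, hg⟩
    exact ⟨e, he, h1, h2, hg⟩
  · rintro ⟨e, he, h1, h2, hg⟩
    exact ⟨e, he, ⟨h1, h2⟩, hg⟩

theorem pvTail_drop (w : List Char) (a : Nat) (j : Nat) (nt : List Char) :
    pvTail (w.drop a) (j : Int) nt = pvTail w ((a : Int) + j) nt := by
  cases nt with
  | nil => rfl
  | cons m0 mt =>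
    simp only [pvTail]
    rw [List.drop_drop]
    congr 1

theorem pvTail_cons_iff (w : List Char) (e : Int) (he : 0 ≤ e) (m0 : Char) (mt : List Char) :
    pvTail w e (m0 :: mt) = true ↔
      ∃ i : Int, (e + 1 ≤ i ∧ i < min (w.length : Int) (e + 4) ∧ PySem.List.pyGet? w i = some m0) ∧
        pvTail w i mt = true := by
  have ha : ((e + 1).toNat : Int) = e + 1 := by omega
  show pvCan (w.drop (e + 1).toNat) m0 mt 2 = true ↔ _
  rw [pvCan_iff]
  constructor
  · rintro ⟨j, hj, hg, ht⟩
    refine ⟨e + 1 + (j : Int), ⟨by omega, ?_, ?_⟩, ?_⟩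
    · rw [List.getElem?_drop] at hg
      have hlt : (e + 1).toNat + j < w.length := by
        by_contra hh
        rw [List.getElem?_eq_none (by omega)] at hg
        simp at hg
      rw [lt_min_iff]
      constructor <;> omega
    · rw [List.getElem?_drop] at hg
      rw [pyGet?_nonneg_eq w _ (by omega)]
      have : (e + 1 + (j : Int)).toNat = (e + 1).toNat + j := by omega
      rw [this]
      exact hg
    · have := pvTail_drop w (e + 1).toNat j mt
      rw [this, show ((((e+1).toNat : Nat) : Int) + (j : Int)) = e + 1 + (j : Int) from by omega] at ht
      exact ht
  · rintro ⟨i, ⟨h1, h2, hg⟩, ht⟩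
    have h2' : i < (w.length : Int) ∧ i < e + 4 := lt_min_iff.mp h2
    refine ⟨(i - e - 1).toNat, by omega, ?_, ?_⟩
    · rw [List.getElem?_drop]
      rw [pyGet?_nonneg_eq w i (by omega)] at hg
      have : (e + 1).toNat + (i - e - 1).toNat = i.toNat := by omega
      rw [this]
      exact hg
    · rw [pvTail_drop w (e + 1).toNat (i - e - 1).toNat mt,
        show (((e + 1).toNat : Int) + ((i - e - 1).toNat : Int)) = i from by omega]
      exact ht

theorem pvStep_any (w : List Char) (m0 : Char) (mt : List Char) (cur : PySem.Set Int)
    (hnn : ∀ e ∈ cur, 0 ≤ e) :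
    (pvStep w m0 cur).any (fun i => pvTail w i mt) = cur.any (fun e => pvTail w e (m0 :: mt)) := by
  rw [Bool.eq_iff_iff]
  simp only [List.any_eq_true]
  constructor
  · rintro ⟨i, hi, ht⟩
    obtain ⟨e, he, hcond⟩ := (mem_pvStep w m0 cur i).mp hi
    exact ⟨e, he, (pvTail_cons_iff w e (hnn e he) m0 mt).mpr ⟨i, hcond, ht⟩⟩
  · rintro ⟨e, he, ht⟩
    obtain ⟨i, hcond, hti⟩ := (pvTail_cons_iff w e (hnn e he) m0 mt).mp ht
    exact ⟨i, (mem_pvStep w m0 cur i).mpr ⟨e, he, hcond⟩, hti⟩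

theorem pvLoop_iff (w : List Char) (rest : List Char) (cur : PySem.Set Int)
    (hnn : ∀ e ∈ cur, 0 ≤ e) :
    pvLoop w rest cur = if cur.any (fun e => pvTail w e rest) then 1 else 0 := by
  induction rest generalizing cur with
  | nil =>
    cases cur with
    | nil => simp [pvLoop]
    | cons x xs => simp [pvLoop, pvTail]
  | cons m0 mt ih =>
    by_cases hc : cur = []
    · subst hc
      simp [pvLoop]
    · have hnn' : ∀ i ∈ pvStep w m0 cur, 0 ≤ i := by
        intro i hi
        obtain ⟨e, he, h1, _⟩ := (mem_pvStep w m0 cur i).mp hi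
        have := hnn e he
        omega
      simp only [pvLoop, if_neg hc]
      rw [ih (pvStep w m0 cur) hnn', pvStep_any w m0 mt cur hnn]

-- ===== VERDICT (by name: the statement is the Claim_ definition above) =====
theorem isThereNisse_spec : Claim_equal_isThereNisse := by
  intro word nisse distance _ hpre
  unfold Spec_isThereNisse isThereNisse isThereNisse_alt
  cases hn : nisse.toList with
  | nil =>
    have hne : nisse = "" := String.toList_eq_nil_iff.mp hn
    have hwe : word = "" := hpre hne
    subst hwe
    simp [pvA]
  | cons n0 nt =>
    show pvA word.toList (n0 :: nt) distance = pvLoop word.toList nt (pvCur0 word.toList n0 distance)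
    have hnn : ∀ e ∈ pvCur0 word.toList n0 distance, 0 ≤ e := by
      intro e he
      exact ((mem_pvCur0 _ _ _ _).mp he).1
    rw [pvA_eq_can, pvLoop_iff _ _ _ hnn]
    have hcond : pvCan word.toList n0 nt (2 - distance) =
        (pvCur0 word.toList n0 distance).any (fun e => pvTail word.toList e nt) := by
      rw [Bool.eq_iff_iff, pvCan_iff]
      simp only [List.any_eq_true]
      constructor
      · rintro ⟨j, hj, hg, ht⟩
        refine ⟨(j : Int), (mem_pvCur0 _ _ _ _).mpr ⟨by positivity, hj, ?_⟩, ht⟩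
        rw [PySem.List.pyGet?_natCast]
        exact hg
      · rintro ⟨e, he, ht⟩
        obtain ⟨h0, hle, hg⟩ := (mem_pvCur0 _ _ _ _).mp he
        refine ⟨e.toNat, by omega, ?_, ?_⟩
        · rw [pyGet?_nonneg_eq word.toList e h0] at hg
          exact hg
        · rw [show ((e.toNat : Nat) : Int) = e from by omega]
          exact ht
    rw [hcond]
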